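-- pv_equiv track=rewrite | github.com/peechi777/boommouse_slot | boom/boom.py | del_combos
-- ===== SOURCE A (Python) =====
-- def is_wild(sym):
--     return sym in ['WW', 'W1', 'W2', 'W3']
--
-- def del_combos(grid, hit_detail):
--     rows, cols = len(grid), len(grid[0])
--     to_clear = [[False]*cols for _ in range(rows)]
--     for target, n, combo, score in hit_detail:
--         for c in range(n):
--             for r in range(rows):
--                 cell = grid[r][c]
--                 if cell == target or (is_wild(cell) and target != 'C1'):
--                     to_clear[r][c] = True
--     for r in range(rows):
--         for c in range(cols):
--             if to_clear[r][c]: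
--                 grid[r][c] = None
--     return grid
-- ===== SOURCE B (Python) =====
-- def is_wild(sym):
--     return sym in ['WW', 'W1', 'W2', 'W3']
--
-- def del_combos(grid, hit_detail):
--     # Index the hits once: max reach (column count) per target symbol, the max
--     # reach of any non-'C1' hit (those also clear wilds), and the overall max
--     # reach `top`; then a single in-place pass over the first `top` columns of
--     # each row decides every cell directly.
--     cols = len(grid[0])
--     reach = {}
--     wild_reach = 0
--     top = 0
--     for target, n, _combo, _score in hit_detail:
--         if n > reach.get(target, 0):
--             reach[target] = n
--         if target != 'C1' and n > wild_reach:
--             wild_reach = n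
--         if n > top:
--             top = n
--     for row in grid:
--         for c in range(top):
--             v = row[c]
--             if c < reach.get(v, 0) or (is_wild(v) and c < wild_reach):
--                 row[c] = None
--     return grid
-- ===== Notes on version B (the rewrite author's own statement) =====
-- stated objective: faster
-- what changed: Replaces A's per-hit full-grid marking table plus second full-grid sweep by a single fold over hit_detail building a max-reach index (per target symbol, wild reach, overall top), followed by one in-place pass over the first top columns of each row.
import Mathlib
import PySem

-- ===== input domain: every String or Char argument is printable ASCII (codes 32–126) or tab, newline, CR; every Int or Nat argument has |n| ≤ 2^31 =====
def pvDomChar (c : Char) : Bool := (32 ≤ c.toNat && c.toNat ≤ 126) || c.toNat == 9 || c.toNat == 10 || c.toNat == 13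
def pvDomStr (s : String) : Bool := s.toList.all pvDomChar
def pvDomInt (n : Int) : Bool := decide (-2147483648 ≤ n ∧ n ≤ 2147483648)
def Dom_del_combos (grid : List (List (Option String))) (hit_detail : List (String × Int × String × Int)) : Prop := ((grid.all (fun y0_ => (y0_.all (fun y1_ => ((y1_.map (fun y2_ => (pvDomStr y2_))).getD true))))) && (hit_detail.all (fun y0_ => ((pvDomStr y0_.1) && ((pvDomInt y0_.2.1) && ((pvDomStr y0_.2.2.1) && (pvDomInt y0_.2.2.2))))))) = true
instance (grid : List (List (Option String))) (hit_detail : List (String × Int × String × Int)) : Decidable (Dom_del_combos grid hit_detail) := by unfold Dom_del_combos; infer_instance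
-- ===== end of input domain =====

-- B replaces A's per-hit full-grid mark table and second full-grid sweep by one fold
-- over the hits building a max-reach index, then a single in-place pass over the first
-- `top` columns of each row (objective: faster). Both Pythons mutate `grid` in place
-- the same way; the theorems are about the RETURN value.

-- ===== PORT A =====
-- is_wild(sym); called on grid cells, which may be None (Option String)
def pyIsWild (sym : Option String) : Bool :=
  [some "WW", some "W1", some "W2", some "W3"].contains sym

-- m[r][c] = v (Python list assignment; indices here come from range(), hence Nat;
-- in-range under Pre_, where List.set coincides with Python assignment)
def upd2 {α : Type} (m : List (List α)) (r c : Nat) (v : α) : List (List α) :=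
  m.set r ((m.getD r []).set c v)

-- cell = grid[r][c]; cell == target or (is_wild(cell) and target != 'C1')
-- (getD defaults never fire under Pre_: indices are in range there)
def cellHit (grid : List (List (Option String))) (r c : Nat) (target : String) : Bool :=
  let cell := (grid.getD r []).getD c none
  cell == some target || (pyIsWild cell && target != "C1")

-- body of `for r in range(rows)`: mark to_clear[r][c] when the cell matches
def innerR (grid : List (List (Option String))) (target : String) (c : Nat)
    (tc : List (List Bool)) (r : Nat) : List (List Bool) :=
  if cellHit grid r c target then upd2 tc r c true else tc

-- body of `for c in range(n)` (range(n) = List.range n.toNat: empty when n ≤ 0, as in Python)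
def markC (grid : List (List (Option String))) (rows : Nat) (target : String)
    (tc : List (List Bool)) (c : Nat) : List (List Bool) :=
  (List.range rows).foldl (innerR grid target c) tc

-- body of `for target, n, combo, score in hit_detail`
def markHit (grid : List (List (Option String))) (rows : Nat)
    (tc : List (List Bool)) (h : String × Int × String × Int) : List (List Bool) :=
  (List.range h.2.1.toNat).foldl (markC grid rows h.1) tc

-- sweep: body of `for c in range(cols)`: if to_clear[r][c]: grid[r][c] = None
def sweepC (tc : List (List Bool)) (r : Nat)
    (g : List (List (Option String))) (c : Nat) : List (List (Option String)) :=
  if (tc.getD r []).getD c false then upd2 g r c none else g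

-- sweep: body of `for r in range(rows)`
def sweepR (tc : List (List Bool)) (cols : Nat)
    (g : List (List (Option String))) (r : Nat) : List (List (Option String)) :=
  (List.range cols).foldl (sweepC tc r) g

def del_combos (grid : List (List (Option String))) (hit_detail : List (String × Int × String × Int)) : List (List (Option String)) :=
  let rows := grid.length
  let cols := (grid.headD []).length  -- grid[0]: IndexError on empty grid, excluded by Pre_
  let tc := hit_detail.foldl (markHit grid rows)
              (List.replicate rows (List.replicate cols false))
  (List.range rows).foldl (sweepR tc cols) grid

-- ===== PORT B =====
-- one fold over hit_detail maintaining (reach dict, wild_reach, top); the dict is keyed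
-- by Option String (Python looks it up with a possibly-None cell; None is never a key)
def stepRW (p : PySem.Dict (Option String) Int × Int × Int) (h : String × Int × String × Int) :
    PySem.Dict (Option String) Int × Int × Int :=
  ((if h.2.1 > p.1.getD (some h.1) 0 then p.1.insert (some h.1) h.2.1 else p.1),
   (if h.1 != "C1" && decide (h.2.1 > p.2.1) then h.2.1 else p.2.1),
   (if h.2.1 > p.2.2 then h.2.1 else p.2.2))

-- body of `for c in range(top)`: v = row[c]; clear row[c] when the index rule fires
-- (getD/set defaults never fire under Pre_, where top ≤ every row length)
def stepB (rw : PySem.Dict (Option String) Int × Int × Int)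
    (row : List (Option String)) (c : Nat) : List (Option String) :=
  let v := row.getD c none
  if (c : Int) < rw.1.getD v 0 ∨ (pyIsWild v = true ∧ (c : Int) < rw.2.1) then
    row.set c none
  else row

-- body of `for row in grid` (range(top) = List.range top.toNat: empty when top ≤ 0)
def sweepRowB (rw : PySem.Dict (Option String) Int × Int × Int)
    (row : List (Option String)) : List (Option String) :=
  (List.range rw.2.2.toNat).foldl (stepB rw) row

def del_combos_alt (grid : List (List (Option String))) (hit_detail : List (String × Int × String × Int)) : List (List (Option String)) :=
  let _cols := (grid.headD []).length  -- cols = len(grid[0]): IndexError on the empty grid, excluded by Pre_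
  let rw := hit_detail.foldl stepRW (PySem.Dict.empty, 0, 0)
  grid.map (sweepRowB rw)

-- ===== PRECONDITION & SPEC =====
-- Pre_ excludes exactly the inputs where Python A raises IndexError: the empty grid
-- (grid[0]) and any hit whose reach n exceeds some row's length (grid[r][c] / to_clear[r][c]).
def Pre_del_combos (grid : List (List (Option String))) (hit_detail : List (String × Int × String × Int)) : Prop :=
  grid ≠ [] ∧ ∀ h ∈ hit_detail, ∀ row ∈ grid, h.2.1 ≤ (row.length : Int)
instance (grid : List (List (Option String))) (hit_detail : List (String × Int × String × Int)) : Decidable (Pre_del_combos grid hit_detail) := by unfold Pre_del_combos; infer_instance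

def pvWitness_del_combos : List (List (Option String)) × (List (String × Int × String × Int)) :=
  ([[some "C1", some "WW"], [some "C2", none]], [("C1", 1, "C1x3", 5), ("C2", 2, "C2x3", 8)])

def Spec_del_combos (grid : List (List (Option String))) (hit_detail : List (String × Int × String × Int)) (out : List (List (Option String))) : Prop := out = del_combos_alt grid hit_detail
instance (grid : List (List (Option String))) (hit_detail : List (String × Int × String × Int)) (out : List (List (Option String))) : Decidable (Spec_del_combos grid hit_detail out) := by unfold Spec_del_combos; infer_instance

-- ===== CLAIM (what is proved, stated in full; the proofs are below) =====
def Claim_equal_del_combos : Prop := ∀ (grid : List (List (Option String))) (hit_detail : List (String × Int × String × Int)), Dom_del_combos grid hit_detail → Pre_del_combos grid hit_detail → Spec_del_combos grid hit_detail (del_combos grid hit_detail)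


-- ===== LEMMAS AND PROOFS =====

-- 2-d cell read with defaults (proof-side view of both ports' indexing)
def getE {α : Type} (m : List (List α)) (d : α) (r c : Nat) : α :=
  (m.getD r []).getD c d

theorem length_upd2 {α : Type} (m : List (List α)) (r c : Nat) (v : α) :
    (upd2 m r c v).length = m.length := by simp [upd2]

theorem rowlen_upd2 {α : Type} (m : List (List α)) (r c : Nat) (v : α) (r' : Nat) :
    ((upd2 m r c v).getD r' []).length = (m.getD r' []).length := by
  unfold upd2
  by_cases h : r = r'
  · subst h
    by_cases hr : r < m.length
    · simp [List.getD_eq_getElem?_getD, List.getElem?_set, hr]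
    · simp [List.getD_eq_getElem?_getD, List.getElem?_set, hr]
  · simp [List.getD_eq_getElem?_getD, List.getElem?_set, h]

theorem getE_upd2 {α : Type} (m : List (List α)) (r c : Nat) (v d : α) (r' c' : Nat)
    (hr : r < m.length) (hc : c < (m.getD r []).length) :
    getE (upd2 m r c v) d r' c' = if r' = r ∧ c' = c then v else getE m d r' c' := by
  unfold getE upd2
  by_cases h : r' = r
  · subst h
    have hrow : (m.set r' ((m.getD r' []).set c v)).getD r' [] = (m.getD r' []).set c v := by
      simp [List.getD_eq_getElem?_getD, List.getElem?_set, hr]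
    rw [hrow]
    by_cases hcc : c' = c
    · subst hcc
      simp only [List.getD_eq_getElem?_getD, List.getElem?_set, List.length_set] at hc ⊢
      simp [hc]
    · simp [List.getD_eq_getElem?_getD, List.getElem?_set, hcc, Ne.symm hcc]
  · have h2 : r ≠ r' := fun hh => h hh.symm
    simp [List.getD_eq_getElem?_getD, List.getElem?_set, h, h2]

-- generic shape preservation for a fold whose step preserves outer and row lengths
theorem foldl_shape {β α : Type} (step : List (List α) → β → List (List α))
    (h1 : ∀ m b, (step m b).length = m.length)
    (h2 : ∀ m b r, ((step m b).getD r []).length = (m.getD r []).length) :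
    ∀ (l : List β) (m : List (List α)),
      (l.foldl step m).length = m.length ∧
      ∀ r, ((l.foldl step m).getD r []).length = (m.getD r []).length := by
  intro l
  induction l with
  | nil => intro m; exact ⟨rfl, fun _ => rfl⟩
  | cons b t ih =>
    intro m
    have := ih (step m b)
    exact ⟨(this.1).trans (h1 m b), fun r => (this.2 r).trans (h2 m b r)⟩

theorem innerR_shape (grid : List (List (Option String))) (t : String) (c : Nat)
    (tc : List (List Bool)) (r : Nat) :
    (innerR grid t c tc r).length = tc.length ∧
    ∀ i, ((innerR grid t c tc r).getD i []).length = (tc.getD i []).length := by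
  unfold innerR; split
  · exact ⟨length_upd2 _ _ _ _, fun i => rowlen_upd2 _ _ _ _ _⟩
  · exact ⟨rfl, fun _ => rfl⟩

theorem markC_shape (grid : List (List (Option String))) (L : Nat) (t : String)
    (tc : List (List Bool)) (c : Nat) :
    (markC grid L t tc c).length = tc.length ∧
    ∀ i, ((markC grid L t tc c).getD i []).length = (tc.getD i []).length :=
  foldl_shape _ (fun m b => (innerR_shape grid t c m b).1)
    (fun m b i => (innerR_shape grid t c m b).2 i) _ tc

theorem markHit_shape (grid : List (List (Option String))) (L : Nat)
    (tc : List (List Bool)) (h : String × Int × String × Int) :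
    (markHit grid L tc h).length = tc.length ∧
    ∀ i, ((markHit grid L tc h).getD i []).length = (tc.getD i []).length :=
  foldl_shape _ (fun m b => (markC_shape grid L h.1 m b).1)
    (fun m b i => (markC_shape grid L h.1 m b).2 i) _ tc

theorem sweepC_shape (tc : List (List Bool)) (r : Nat)
    (g : List (List (Option String))) (c : Nat) :
    (sweepC tc r g c).length = g.length ∧
    ∀ i, ((sweepC tc r g c).getD i []).length = (g.getD i []).length := by
  unfold sweepC; split
  · exact ⟨length_upd2 _ _ _ _, fun i => rowlen_upd2 _ _ _ _ _⟩
  · exact ⟨rfl, fun _ => rfl⟩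

theorem sweepR_shape (tc : List (List Bool)) (cols : Nat)
    (g : List (List (Option String))) (r : Nat) :
    (sweepR tc cols g r).length = g.length ∧
    ∀ i, ((sweepR tc cols g r).getD i []).length = (g.getD i []).length :=
  foldl_shape _ (fun m b => (sweepC_shape tc r m b).1)
    (fun m b i => (sweepC_shape tc r m b).2 i) _ g

-- marking: inner loop over r
theorem getE_foldR (grid : List (List (Option String))) (t : String) (c : Nat)
    (L : Nat) (tc : List (List Bool)) (r' c' : Nat)
    (hL : L ≤ tc.length) (hc : ∀ i, i < L → c < (tc.getD i []).length) :
    (getE ((List.range L).foldl (innerR grid t c) tc) false r' c' = true ↔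
      getE tc false r' c' = true ∨ (r' < L ∧ c' = c ∧ cellHit grid r' c t = true)) := by
  induction L with
  | zero => simp
  | succ n ih =>
    rw [List.range_succ, List.foldl_append]
    set F := (List.range n).foldl (innerR grid t c) tc with hF
    have hshape := foldl_shape (innerR grid t c)
      (fun m b => (innerR_shape grid t c m b).1)
      (fun m b i => (innerR_shape grid t c m b).2 i) (List.range n) tc
    have hFlen : F.length = tc.length := hshape.1
    have hFrow : ∀ i, (F.getD i []).length = (tc.getD i []).length := hshape.2
    have hnF : n < F.length := by omega
    have hcF : c < (F.getD n []).length := by rw [hFrow]; exact hc n (by omega)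
    have hstep : getE (innerR grid t c F n) false r' c' = true ↔
        getE F false r' c' = true ∨ (r' = n ∧ c' = c ∧ cellHit grid n c t = true) := by
      unfold innerR
      split
      · rw [getE_upd2 F n c true false r' c' hnF hcF]
        split
        · simp; tauto
        · simp; tauto
      · simp; tauto
    rw [List.foldl_cons, List.foldl_nil, hstep,
        ih (by omega) (fun i hi => hc i (by omega))]
    constructor
    · rintro ((h | ⟨h1, h2, h3⟩) | ⟨h1, h2, h3⟩)
      · exact Or.inl h
      · exact Or.inr ⟨by omega, h2, h3⟩
      · subst h1 h2; exact Or.inr ⟨by omega, rfl, h3⟩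
    · rintro (h | ⟨h1, h2, h3⟩)
      · exact Or.inl (Or.inl h)
      · by_cases hr : r' < n
        · exact Or.inl (Or.inr ⟨hr, h2, h3⟩)
        · have : r' = n := by omega
          subst this h2; exact Or.inr ⟨rfl, rfl, h3⟩

-- marking: middle loop over c (k = n.toNat)
theorem getE_foldC (grid : List (List (Option String))) (t : String)
    (L k : Nat) (tc : List (List Bool)) (r' c' : Nat)
    (hL : L ≤ tc.length) (hk : ∀ i, i < L → k ≤ (tc.getD i []).length) :
    (getE ((List.range k).foldl (markC grid L t) tc) false r' c' = true ↔
      getE tc false r' c' = true ∨ (r' < L ∧ c' < k ∧ cellHit grid r' c' t = true)) := by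
  induction k with
  | zero => simp
  | succ n ih =>
    rw [List.range_succ, List.foldl_append, List.foldl_cons, List.foldl_nil]
    set F := (List.range n).foldl (markC grid L t) tc with hF
    have hshape := foldl_shape (markC grid L t)
      (fun m b => (markC_shape grid L t m b).1)
      (fun m b i => (markC_shape grid L t m b).2 i) (List.range n) tc
    have hFlen : F.length = tc.length := hshape.1
    have hstep : getE (markC grid L t F n) false r' c' = true ↔
        getE F false r' c' = true ∨ (r' < L ∧ c' = n ∧ cellHit grid r' n t = true) := by
      unfold markC
      exact getE_foldR grid t n L F r' c' (by omega)
        (fun i hi => by rw [hshape.2]; have := hk i hi; omega)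
    rw [hstep, ih (fun i hi => by have := hk i hi; omega)]
    constructor
    · rintro ((h | ⟨h1, h2, h3⟩) | ⟨h1, h2, h3⟩)
      · exact Or.inl h
      · exact Or.inr ⟨h1, by omega, h3⟩
      · subst h2; exact Or.inr ⟨h1, by omega, h3⟩
    · rintro (h | ⟨h1, h2, h3⟩)
      · exact Or.inl (Or.inl h)
      · by_cases hcn : c' < n
        · exact Or.inl (Or.inr ⟨h1, hcn, h3⟩)
        · have : c' = n := by omega
          subst this; exact Or.inr ⟨h1, rfl, h3⟩

-- marking: outer loop over hit_detail
theorem getE_markAll (grid : List (List (Option String))) (L cols : Nat)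
    (hd : List (String × Int × String × Int)) (tc : List (List Bool)) (r' c' : Nat)
    (hL : L ≤ tc.length) (hcols : ∀ i, i < L → cols ≤ (tc.getD i []).length)
    (hhd : ∀ h ∈ hd, h.2.1 ≤ (cols : Int)) :
    (getE (hd.foldl (markHit grid L) tc) false r' c' = true ↔
      getE tc false r' c' = true ∨
        ∃ h ∈ hd, r' < L ∧ (c' : Int) < h.2.1 ∧ cellHit grid r' c' h.1 = true) := by
  induction hd generalizing tc with
  | nil => simp
  | cons h t ih =>
    rw [List.foldl_cons]
    have hn : h.2.1 ≤ (cols : Int) := hhd h (List.mem_cons_self ..)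
    have hkcols : h.2.1.toNat ≤ cols := by omega
    have hstep : getE (markHit grid L tc h) false r' c' = true ↔
        getE tc false r' c' = true ∨
          (r' < L ∧ c' < h.2.1.toNat ∧ cellHit grid r' c' h.1 = true) := by
      unfold markHit
      exact getE_foldC grid h.1 L h.2.1.toNat tc r' c' hL
        (fun i hi => le_trans hkcols (hcols i hi))
    have hsh := markHit_shape grid L tc h
    rw [ih (markHit grid L tc h) (by omega)
        (fun i hi => by rw [hsh.2]; exact hcols i hi)
        (fun x hx => hhd x (List.mem_cons_of_mem _ hx)), hstep]
    have hcast : (c' < h.2.1.toNat) ↔ ((c' : Int) < h.2.1) := by omega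
    simp only [List.mem_cons]
    constructor
    · rintro ((hh | ⟨h1, h2, h3⟩) | ⟨x, hx, rest⟩)
      · exact Or.inl hh
      · exact Or.inr ⟨h, Or.inl rfl, h1, hcast.mp h2, h3⟩
      · exact Or.inr ⟨x, Or.inr hx, rest⟩
    · rintro (hh | ⟨x, (rfl | hx), rest⟩)
      · exact Or.inl (Or.inl hh)
      · exact Or.inl (Or.inr ⟨rest.1, hcast.mpr rest.2.1, rest.2.2⟩)
      · exact Or.inr ⟨x, hx, rest⟩

-- the sweep: inner loop over c
theorem getE_sweepCfold (tc : List (List Bool)) (r cols : Nat)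
    (g : List (List (Option String))) (r' c' : Nat)
    (hr : r < g.length)
    (hrow : ∀ c, c < cols → (tc.getD r []).getD c false = true → c < (g.getD r []).length) :
    getE ((List.range cols).foldl (sweepC tc r) g) none r' c' =
      if r' = r ∧ c' < cols ∧ (tc.getD r []).getD c' false = true then none
      else getE g none r' c' := by
  induction cols with
  | zero => simp
  | succ n ih =>
    rw [List.range_succ, List.foldl_append, List.foldl_cons, List.foldl_nil]
    set F := (List.range n).foldl (sweepC tc r) g with hF
    have hshape := foldl_shape (sweepC tc r)
      (fun m b => (sweepC_shape tc r m b).1)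
      (fun m b i => (sweepC_shape tc r m b).2 i) (List.range n) g
    have hFlen : F.length = g.length := hshape.1
    have hstep : getE (sweepC tc r F n) none r' c' =
        if r' = r ∧ c' = n ∧ (tc.getD r []).getD n false = true then none
        else getE F none r' c' := by
      unfold sweepC
      split
      · rename_i hmark
        rw [getE_upd2 F r n none none r' c' (by omega)
            (by rw [hshape.2]; exact hrow n (by omega) hmark)]
        by_cases hrc : r' = r ∧ c' = n
        · rw [if_pos hrc, if_pos ⟨hrc.1, hrc.2, hmark⟩]
        · rw [if_neg hrc, if_neg (fun hh => hrc ⟨hh.1, hh.2.1⟩)]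
      · rename_i hmark
        rw [if_neg (fun hh => by rw [hh.2.2] at hmark; exact hmark rfl)]
    rw [hstep, ih (fun c hc => hrow c (by omega))]
    by_cases hA : r' = r ∧ c' < n + 1 ∧ (tc.getD r []).getD c' false = true
    · obtain ⟨h1, h2, h3⟩ := hA
      conv_rhs => rw [if_pos ⟨h1, h2, h3⟩]
      rcases (by omega : c' = n ∨ c' < n) with h | h
      · subst h; rw [if_pos ⟨h1, rfl, h3⟩]
      · rw [if_neg (show ¬(r' = r ∧ c' = n ∧ (tc.getD r []).getD n false = true) from
              fun hh => by omega), if_pos ⟨h1, h, h3⟩]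
    · rw [if_neg (show ¬(r' = r ∧ c' = n ∧ (tc.getD r []).getD n false = true) from
            fun hh => hA ⟨hh.1, by omega, by rw [hh.2.1]; exact hh.2.2⟩),
          if_neg (show ¬(r' = r ∧ c' < n ∧ (tc.getD r []).getD c' false = true) from
            fun hh => hA ⟨hh.1, by omega, hh.2.2⟩),
          if_neg hA]

-- the sweep: outer loop over r
theorem getE_sweepAll (tc : List (List Bool)) (cols L : Nat)
    (g : List (List (Option String))) (r' c' : Nat)
    (hL : L ≤ g.length)
    (hrow : ∀ r, r < L → ∀ c, c < cols → (tc.getD r []).getD c false = true →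
      c < (g.getD r []).length) :
    getE ((List.range L).foldl (sweepR tc cols) g) none r' c' =
      if r' < L ∧ c' < cols ∧ (tc.getD r' []).getD c' false = true then none
      else getE g none r' c' := by
  induction L with
  | zero => simp
  | succ n ih =>
    rw [List.range_succ, List.foldl_append, List.foldl_cons, List.foldl_nil]
    set F := (List.range n).foldl (sweepR tc cols) g with hF
    have hshape := foldl_shape (sweepR tc cols)
      (fun m b => (sweepR_shape tc cols m b).1)
      (fun m b i => (sweepR_shape tc cols m b).2 i) (List.range n) g
    have hFlen : F.length = g.length := hshape.1
    have hstep : getE (sweepR tc cols F n) none r' c' =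
        if r' = n ∧ c' < cols ∧ (tc.getD n []).getD c' false = true then none
        else getE F none r' c' := by
      unfold sweepR
      rw [getE_sweepCfold tc n cols F r' c' (by omega)
        (fun c hc hm => by rw [hshape.2]; exact hrow n (by omega) c hc hm)]
    rw [hstep, ih (by omega) (fun r hrn => hrow r (by omega))]
    by_cases hA : r' < n + 1 ∧ c' < cols ∧ (tc.getD r' []).getD c' false = true
    · obtain ⟨h1, h2, h3⟩ := hA
      conv_rhs => rw [if_pos ⟨h1, h2, h3⟩]
      rcases (by omega : r' = n ∨ r' < n) with h | h
      · subst h; rw [if_pos ⟨rfl, h2, h3⟩]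
      · rw [if_neg (show ¬(r' = n ∧ c' < cols ∧ (tc.getD n []).getD c' false = true) from
              fun hh => by omega), if_pos ⟨h, h2, h3⟩]
    · rw [if_neg (show ¬(r' = n ∧ c' < cols ∧ (tc.getD n []).getD c' false = true) from
            fun hh => hA ⟨by omega, hh.2.1, by rw [hh.1]; exact hh.2.2⟩),
          if_neg (show ¬(r' < n ∧ c' < cols ∧ (tc.getD r' []).getD c' false = true) from
            fun hh => hA ⟨by omega, hh.2.1, hh.2.2⟩),
          if_neg hA]

-- B side: the reach dictionary after the fold
theorem reach_lt (hd : List (String × Int × String × Int))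
    (p : PySem.Dict (Option String) Int × Int × Int) (v : Option String) (c : Int) :
    (c < (hd.foldl stepRW p).1.getD v 0 ↔
      c < p.1.getD v 0 ∨ ∃ h ∈ hd, v = some h.1 ∧ c < h.2.1) := by
  induction hd generalizing p with
  | nil => simp
  | cons h t ih =>
    rw [List.foldl_cons, ih]
    have hstep : (c < (stepRW p h).1.getD v 0 ↔
        c < p.1.getD v 0 ∨ (v = some h.1 ∧ c < h.2.1)) := by
      unfold stepRW
      dsimp only
      split
      · rename_i hgt
        rw [PySem.Dict.getD_insert]
        by_cases hv : v = some h.1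
        · simp [hv]; omega
        · simp [hv]
      · rename_i hgt
        push_neg at hgt
        by_cases hv : v = some h.1
        · subst hv; constructor
          · intro hh; exact Or.inl hh
          · rintro (hh | ⟨_, hlt⟩); exact hh; omega
        · simp [hv]
    rw [hstep]
    simp only [List.mem_cons]
    constructor
    · rintro ((hh | hh) | ⟨x, hx, rest⟩)
      · exact Or.inl hh
      · exact Or.inr ⟨h, Or.inl rfl, hh⟩
      · exact Or.inr ⟨x, Or.inr hx, rest⟩
    · rintro (hh | ⟨x, (rfl | hx), rest⟩)
      · exact Or.inl (Or.inl hh)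
      · exact Or.inl (Or.inr rest)
      · exact Or.inr ⟨x, hx, rest⟩

theorem wild_lt (hd : List (String × Int × String × Int))
    (p : PySem.Dict (Option String) Int × Int × Int) (c : Int) :
    (c < (hd.foldl stepRW p).2.1 ↔
      c < p.2.1 ∨ ∃ h ∈ hd, h.1 ≠ "C1" ∧ c < h.2.1) := by
  induction hd generalizing p with
  | nil => simp
  | cons h t ih =>
    rw [List.foldl_cons, ih]
    have hstep : (c < (stepRW p h).2.1 ↔ c < p.2.1 ∨ (h.1 ≠ "C1" ∧ c < h.2.1)) := by
      unfold stepRW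
      dsimp only
      split
      · rename_i hgt
        simp only [Bool.and_eq_true, bne_iff_ne, decide_eq_true_eq] at hgt
        constructor
        · intro hh
          by_cases hc : c < p.2.1
          · exact Or.inl hc
          · exact Or.inr ⟨hgt.1, hh⟩
        · rintro (hh | ⟨_, hlt⟩)
          · omega
          · exact hlt
      · rename_i hgt
        simp only [Bool.and_eq_true, bne_iff_ne, decide_eq_true_eq, not_and, not_lt] at hgt
        constructor
        · intro hh; exact Or.inl hh
        · rintro (hh | ⟨hne, hlt⟩)
          · exact hh
          · have := hgt hne; omega
    rw [hstep]
    simp only [List.mem_cons]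
    constructor
    · rintro ((hh | hh) | ⟨x, hx, rest⟩)
      · exact Or.inl hh
      · exact Or.inr ⟨h, Or.inl rfl, hh⟩
      · exact Or.inr ⟨x, Or.inr hx, rest⟩
    · rintro (hh | ⟨x, (rfl | hx), rest⟩)
      · exact Or.inl (Or.inl hh)
      · exact Or.inl (Or.inr rest)
      · exact Or.inr ⟨x, hx, rest⟩

theorem top_lt (hd : List (String × Int × String × Int))
    (p : PySem.Dict (Option String) Int × Int × Int) (c : Int) :
    (c < (hd.foldl stepRW p).2.2 ↔
      c < p.2.2 ∨ ∃ h ∈ hd, c < h.2.1) := by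
  induction hd generalizing p with
  | nil => simp
  | cons h t ih =>
    rw [List.foldl_cons, ih]
    have hstep : (c < (stepRW p h).2.2 ↔ c < p.2.2 ∨ c < h.2.1) := by
      unfold stepRW
      dsimp only
      split <;> omega
    rw [hstep]
    simp only [List.mem_cons]
    constructor
    · rintro ((hh | hh) | ⟨x, hx, rest⟩)
      · exact Or.inl hh
      · exact Or.inr ⟨h, Or.inl rfl, hh⟩
      · exact Or.inr ⟨x, Or.inr hx, rest⟩
    · rintro (hh | ⟨x, (rfl | hx), rest⟩)
      · exact Or.inl (Or.inl hh)
      · exact Or.inl (Or.inr rest)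
      · exact Or.inr ⟨x, hx, rest⟩

-- B's per-row pass: length and entry view (every set lands in range under the hyp)
theorem foldB_get (rw : PySem.Dict (Option String) Int × Int × Int)
    (row : List (Option String)) (k : Nat) (hk : k ≤ row.length) :
    (((List.range k).foldl (stepB rw) row).length = row.length ∧
      ∀ c', ((List.range k).foldl (stepB rw) row).getD c' none =
        if c' < k ∧ ((c' : Int) < rw.1.getD (row.getD c' none) 0 ∨
            (pyIsWild (row.getD c' none) = true ∧ (c' : Int) < rw.2.1)) then none
        else row.getD c' none) := by
  induction k with
  | zero => exact ⟨rfl, fun c' => by simp⟩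
  | succ n ih =>
    obtain ⟨ihlen, ihget⟩ := ih (by omega)
    rw [List.range_succ, List.foldl_append, List.foldl_cons, List.foldl_nil]
    set F := (List.range n).foldl (stepB rw) row with hF
    have hFn : F.getD n none = row.getD n none := by
      rw [ihget n, if_neg (fun hh => by omega)]
    have hset : ∀ c', (F.set n (none : Option String)).getD c' none =
        if c' = n then none else F.getD c' none := by
      intro c'
      by_cases hc : c' = n
      · subst hc
        rw [List.getD_eq_getElem _ _ (by rw [List.length_set, ihlen]; omega)]
        simp
      · simp [List.getD_eq_getElem?_getD, List.getElem?_set, hc, Ne.symm hc]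
    unfold stepB
    rw [hFn]
    dsimp only
    constructor
    · split
      · rw [List.length_set, ihlen]
      · exact ihlen
    · intro d
      split
      · rename_i hcond
        rw [hset d]
        by_cases hc : d = n
        · subst hc
          rw [if_pos rfl, if_pos ⟨by omega, hcond⟩]
        · rw [if_neg hc, ihget d]
          by_cases hlt : d < n ∧ ((d : Int) < rw.1.getD (row.getD d none) 0 ∨
              (pyIsWild (row.getD d none) = true ∧ (d : Int) < rw.2.1))
          · rw [if_pos hlt, if_pos ⟨by omega, hlt.2⟩]
          · rw [if_neg hlt, if_neg (fun hh => hlt ⟨by omega, hh.2⟩)]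
      · rename_i hcond
        rw [ihget d]
        by_cases hlt : d < n ∧ ((d : Int) < rw.1.getD (row.getD d none) 0 ∨
            (pyIsWild (row.getD d none) = true ∧ (d : Int) < rw.2.1))
        · rw [if_pos hlt, if_pos ⟨by omega, hlt.2⟩]
        · rw [if_neg hlt]
          by_cases hc : d = n
          · subst hc
            rw [if_neg (fun hh => hcond hh.2)]
          · rw [if_neg (fun hh => hlt ⟨by omega, hh.2⟩)]

-- entry view of both results: everything is decided pointwise
theorem main_pointwise (grid : List (List (Option String)))
    (hd : List (String × Int × String × Int))
    (hne : grid ≠ [])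
    (hall : ∀ h ∈ hd, ∀ row ∈ grid, h.2.1 ≤ (row.length : Int)) :
    del_combos grid hd = del_combos_alt grid hd := by
  unfold del_combos del_combos_alt
  dsimp only
  set L := grid.length with hL
  set cols := (grid.headD []).length with hcolsdef
  have hhead : grid.headD [] ∈ grid := by
    cases grid with
    | nil => exact absurd rfl hne
    | cons a t => exact List.mem_cons_self ..
  have hhd : ∀ h ∈ hd, h.2.1 ≤ (cols : Int) := fun h hh => hall h hh _ hhead
  set tc0 := List.replicate L (List.replicate cols false) with htc0
  set tc := hd.foldl (markHit grid L) tc0 with htc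
  have htc0len : tc0.length = L := List.length_replicate
  have htc0row : ∀ i, i < L → (tc0.getD i []).length = cols := by
    intro i hi
    rw [htc0, List.getD_eq_getElem _ _ (by simpa using hi)]
    simp
  have htc0get : ∀ r c, getE tc0 false r c = false := by
    intro r c
    simp only [getE, htc0, List.getD_eq_getElem?_getD, List.getElem?_replicate]
    split
    · simp [List.getElem?_replicate]
      split <;> simp
    · simp
  have hmark : ∀ r c : Nat, ((tc.getD r []).getD c false = true ↔
      ∃ h ∈ hd, r < L ∧ (c : Int) < h.2.1 ∧ cellHit grid r c h.1 = true) := by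
    intro r c
    have := getE_markAll grid L cols hd tc0 r c (by omega)
      (fun i hi => by rw [htc0row i hi]) hhd
    rw [htc0get] at this
    simpa [getE] using this
  -- shape of the marking result (used for the sweep bounds)
  have hrowbound : ∀ r, r < L → ∀ c, c < cols →
      (tc.getD r []).getD c false = true → c < (grid.getD r []).length := by
    intro r hr c hc hm
    obtain ⟨h, hh, -, hlt, -⟩ := (hmark r c).mp hm
    have hrowmem : grid.getD r [] ∈ grid := by
      rw [List.getD_eq_getElem _ _ (by simpa using hr)]
      exact List.getElem_mem _
    have := hall h hh _ hrowmem
    omega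
  have hsweep := fun r' c' => getE_sweepAll tc cols L grid r' c' (by omega) hrowbound
  -- shapes of the final lists
  have hshape := foldl_shape (sweepR tc cols)
    (fun m b => (sweepR_shape tc cols m b).1)
    (fun m b i => (sweepR_shape tc cols m b).2 i) (List.range L) grid
  set A := (List.range L).foldl (sweepR tc cols) grid with hA
  set rwp := hd.foldl stepRW (PySem.Dict.empty, 0, 0) with hrwp
  apply List.ext_getElem (by simpa using hshape.1)
  intro r hr1 hr2
  have hrL : r < L := by simpa using hr2
  have hrowlen : (A.getD r []).length = (grid.getD r []).length := hshape.2 r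
  have hAr : A[r] = A.getD r [] := (List.getD_eq_getElem A [] hr1).symm
  have hgr : grid[r] = grid.getD r [] := (List.getD_eq_getElem grid [] (by simpa using hrL)).symm
  rw [List.getElem_map]
  -- B's bound on the scanned columns: top ≤ this row's length
  have hrowmem : grid[r] ∈ grid := List.getElem_mem _
  have htople : rwp.2.2.toNat ≤ grid[r].length := by
    by_cases h0 : rwp.2.2 ≤ 0
    · omega
    · have := (top_lt hd (PySem.Dict.empty, 0, 0) (rwp.2.2 - 1)).mp (by rw [← hrwp]; omega)
      rcases this with h | ⟨h, hh, hlt⟩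
      · simp at h; omega
      · have := hall h hh _ hrowmem; omega
  have hBfold := foldB_get rwp grid[r] rwp.2.2.toNat htople
  apply List.ext_getElem (by rw [hAr, hrowlen, ← hgr]; unfold sweepRowB; rw [hBfold.1])
  intro c hc1 hc2
  have hcrow : c < grid[r].length := by
    rw [hgr, ← hrowlen, ← hAr]; exact hc1
  -- the B-side entry
  have hc2' : c < (sweepRowB rwp grid[r]).length := hc2
  rw [show (sweepRowB rwp grid[r])[c] = (sweepRowB rwp grid[r]).getD c none from
        (List.getD_eq_getElem _ none hc2').symm]
  unfold sweepRowB
  rw [hBfold.2 c]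
  -- the A-side entry
  have hAentry : A[r][c] = getE A none r c := by
    rw [getE, List.getD_eq_getElem A [] hr1, List.getD_eq_getElem _ _ hc1]
  rw [hAentry, hsweep r c]
  -- value of the cell
  set v := grid[r][c] with hv
  have hcell : (grid.getD r []).getD c none = v := by
    rw [← hgr, List.getD_eq_getElem _ _ hcrow]
  have hcell2 : grid[r].getD c none = v := by
    rw [List.getD_eq_getElem _ _ hcrow]
  have hgetE : getE grid none r c = v := hcell
  rw [hgetE, hcell2]
  -- B-side condition via the fold lemmas
  have hreach : ((c : Int) < rwp.1.getD v 0 ↔ ∃ h ∈ hd, v = some h.1 ∧ (c : Int) < h.2.1) := by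
    rw [hrwp, reach_lt]
    simp [PySem.Dict.getD_empty]
  have hwild : ((c : Int) < rwp.2.1 ↔ ∃ h ∈ hd, h.1 ≠ "C1" ∧ (c : Int) < h.2.1) := by
    rw [hrwp, wild_lt]
    simp
  have htop : ((c : Int) < rwp.2.2 ↔ ∃ h ∈ hd, (c : Int) < h.2.1) := by
    rw [hrwp, top_lt]
    simp
  have hcellhit : ∀ t : String, (cellHit grid r c t = true ↔
      (v = some t ∨ (pyIsWild v = true ∧ t ≠ "C1"))) := by
    intro t
    unfold cellHit
    rw [hcell]
    simp
  have hcond : (r < L ∧ c < cols ∧ (tc.getD r []).getD c false = true) ↔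
      (c < rwp.2.2.toNat ∧ ((c : Int) < rwp.1.getD v 0 ∨
        (pyIsWild v = true ∧ (c : Int) < rwp.2.1))) := by
    constructor
    · rintro ⟨-, -, hm⟩
      obtain ⟨h, hh, -, hlt, hhit⟩ := (hmark r c).mp hm
      have hctop : c < rwp.2.2.toNat := by
        have h2 : (c : Int) < rwp.2.2 := htop.mpr ⟨h, hh, hlt⟩
        exact Int.lt_toNat.mpr h2
      rcases (hcellhit h.1).mp hhit with h1 | ⟨h1, h2⟩
      · exact ⟨hctop, Or.inl (hreach.mpr ⟨h, hh, h1, hlt⟩)⟩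
      · exact ⟨hctop, Or.inr ⟨h1, hwild.mpr ⟨h, hh, h2, hlt⟩⟩⟩
    · rintro ⟨-, hh | ⟨hw, hh⟩⟩
      · obtain ⟨h, hh2, h1, hlt⟩ := hreach.mp hh
        have hcc : c < cols := by have := hhd h hh2; omega
        exact ⟨hrL, hcc, (hmark r c).mpr ⟨h, hh2, hrL, hlt, (hcellhit h.1).mpr (Or.inl h1)⟩⟩
      · obtain ⟨h, hh2, h1, hlt⟩ := hwild.mp hh
        have hcc : c < cols := by have := hhd h hh2; omega
        exact ⟨hrL, hcc, (hmark r c).mpr ⟨h, hh2, hrL, hlt, (hcellhit h.1).mpr (Or.inr ⟨hw, h1⟩)⟩⟩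
  rw [if_congr hcond rfl rfl]

-- ===== VERDICT (by name: the statement is the Claim_ definition above) =====
theorem del_combos_spec : Claim_equal_del_combos := by
  intro grid hd _ hpre
  exact main_pointwise grid hd hpre.1 hpre.2
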